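-- pv_equiv track=rewrite | github.com/raghu-135/askPDF | rag_service/agent.py | _sanitize_lines_with_blocklist
-- ===== SOURCE A (Python) =====
-- from typing import TypedDict, List, Annotated, Dict, Any, Optional
--
-- def _sanitize_lines_with_blocklist(raw: str, blocklist: List[str], max_chars: int) -> str:
--     if not raw:
--         return ""
--     lines = []
--     for line in raw.splitlines():
--         check = line.strip().lower()
--         if any(bad in check for bad in blocklist):
--             continue
--         lines.append(line)
--     return "\n".join(lines).strip()[:max_chars]
-- ===== SOURCE B (Python) =====
-- def _sanitize_lines_with_blocklist(raw, blocklist, max_chars):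
--     # Pair each line once with its stripped-lowered form, then filter the whole
--     # list successively by each blocklist pattern (outer loop over blocklist).
--     kept = [(line, line.strip().lower()) for line in raw.splitlines()]
--     for bad in blocklist:
--         kept = [(line, low) for (line, low) in kept if bad not in low]
--     return "\n".join(line for line, _ in kept).strip()[:max_chars]
-- ===== Notes on version B (the rewrite author's own statement) =====
-- stated objective: alternative
-- what changed: B inverts the loop nesting: it precomputes each line's stripped-lowered form once, then filters the whole line list successively by each blocklist pattern (outer loop over blocklist) instead of testing every pattern inside a per-line loop, and drops A's special-case early return for empty input.
import Mathlib
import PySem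

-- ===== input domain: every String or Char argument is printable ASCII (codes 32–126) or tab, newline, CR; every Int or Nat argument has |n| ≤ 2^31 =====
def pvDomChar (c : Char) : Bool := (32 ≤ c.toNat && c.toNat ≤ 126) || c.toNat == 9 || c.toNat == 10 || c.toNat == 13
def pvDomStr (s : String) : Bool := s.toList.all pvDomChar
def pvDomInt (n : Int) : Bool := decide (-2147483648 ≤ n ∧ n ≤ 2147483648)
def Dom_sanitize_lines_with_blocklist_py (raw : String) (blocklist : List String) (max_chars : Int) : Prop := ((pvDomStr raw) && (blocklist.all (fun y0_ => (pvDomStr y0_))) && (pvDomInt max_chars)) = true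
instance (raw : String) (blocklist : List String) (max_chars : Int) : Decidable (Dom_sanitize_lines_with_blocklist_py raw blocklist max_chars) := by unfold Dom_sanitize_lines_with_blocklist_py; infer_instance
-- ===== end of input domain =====

-- B inverts the loop nesting: tag each line once with its stripped-lowered form, then filter the
-- whole line list successively by each blocklist pattern (outer loop over blocklist); alternative
-- decomposition, same cost.

-- ===== PORT A =====
def sanitize_lines_with_blocklist_py (raw : String) (blocklist : List String) (max_chars : Int) : String :=
  if raw = "" then "" else
  let lines : List String := (PySem.Str.splitlines raw).foldl (fun acc line =>
    let check := PySem.Str.lower (PySem.Str.strip line)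
    if blocklist.any (fun bad => PySem.Str.isIn bad check) then acc
    else acc ++ [line]) []
  PySem.Str.slice (PySem.Str.strip (PySem.Str.join "\n" lines)) none (some max_chars)

-- ===== PORT B =====
def sanitize_lines_with_blocklist_py_alt (raw : String) (blocklist : List String) (max_chars : Int) : String :=
  let kept0 : List (String × String) :=
    (PySem.Str.splitlines raw).map (fun line => (line, PySem.Str.lower (PySem.Str.strip line)))
  let kept := blocklist.foldl (fun ks bad => ks.filter (fun p => !(PySem.Str.isIn bad p.2))) kept0
  PySem.Str.slice (PySem.Str.strip (PySem.Str.join "\n" (kept.map Prod.fst))) none (some max_chars)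

-- ===== PRECONDITION & SPEC =====
def Spec_sanitize_lines_with_blocklist_py (raw : String) (blocklist : List String) (max_chars : Int) (out : String) : Prop := out = sanitize_lines_with_blocklist_py_alt raw blocklist max_chars
instance (raw : String) (blocklist : List String) (max_chars : Int) (out : String) : Decidable (Spec_sanitize_lines_with_blocklist_py raw blocklist max_chars out) := by unfold Spec_sanitize_lines_with_blocklist_py; infer_instance

-- ===== CLAIM (what is proved, stated in full; the proofs are below) =====
def Claim_equal_sanitize_lines_with_blocklist_py : Prop := ∀ (raw : String) (blocklist : List String) (max_chars : Int), Dom_sanitize_lines_with_blocklist_py raw blocklist max_chars → Spec_sanitize_lines_with_blocklist_py raw blocklist max_chars (sanitize_lines_with_blocklist_py raw blocklist max_chars)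

-- ===== LEMMAS AND PROOFS =====

-- Successive filtering by each pattern = one filter by "no pattern matches".
theorem foldl_filter_eq_filter_any {α β : Type} (f : β → α → Bool) (bl : List β) (ks : List α) :
    bl.foldl (fun ks bad => ks.filter (fun p => !(f bad p))) ks
      = ks.filter (fun p => !(bl.any (fun bad => f bad p))) := by
  induction bl generalizing ks with
  | nil => simp
  | cons b bs ih =>
    simp only [List.foldl_cons, ih, List.filter_filter, List.any_cons]
    congr 1
    funext p
    cases f b p <;> simp

theorem sanitize_lines_with_blocklist_py_spec : Claim_equal_sanitize_lines_with_blocklist_py := by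
  intro raw bl mc _
  unfold Spec_sanitize_lines_with_blocklist_py
  unfold sanitize_lines_with_blocklist_py sanitize_lines_with_blocklist_py_alt
  by_cases h : raw = ""
  · subst h
    rw [if_pos rfl]
    show "" = _
    have h1 : PySem.Chars.splitlines ([] : List Char) = [] := rfl
    have h2 : PySem.Chars.join ['\n'] ([] : List (List Char)) = [] := rfl
    have h3 : PySem.Chars.strip ([] : List Char) = [] := rfl
    simp [foldl_filter_eq_filter_any, PySem.Str.slice, PySem.Chars.slice_eq_listSlice,
          PySem.List.slice, PySem.Str.splitlines, h1, h2, h3]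
  · rw [if_neg h]
    have hfun : (fun (acc : List String) (line : String) =>
        if bl.any (fun bad => PySem.Str.isIn bad (PySem.Str.lower (PySem.Str.strip line))) then acc
        else acc ++ [line])
        = (fun acc line =>
        if (!(bl.any (fun bad => PySem.Str.isIn bad (PySem.Str.lower (PySem.Str.strip line))))) then acc ++ [line]
        else acc) := by
      funext a l
      cases bl.any (fun bad => PySem.Str.isIn bad (PySem.Str.lower (PySem.Str.strip l))) <;> simp
    show PySem.Str.slice _ none (some mc) = PySem.Str.slice _ none (some mc)
    rw [hfun, PySem.List.foldl_append_if_eq_filter, foldl_filter_eq_filter_any]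
    simp [List.filter_map, List.map_map, Function.comp_def]
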